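-- pv_equiv track=rewrite | github.com/hululu75/mxBridge | backends/matrix_target.py | _strip_reply_quote
-- ===== SOURCE A (Python) =====
-- def _strip_reply_quote(body: str) -> str:
--     """Strip only the leading Matrix reply fallback block (lines starting with '> ').
--
--     The Matrix spec places the quoted fallback at the top, separated from
--     the actual reply by a blank line.  Only that leading block is stripped
--     so user-authored markdown blockquotes elsewhere in the message are
--     preserved."""
--     lines = body.split("\n")
--     i = 0
--     while i < len(lines) and lines[i].startswith("> "):
--         i += 1
--     # Skip the blank separator line that follows the quote block
--     while i < len(lines) and lines[i].strip() == "":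
--         i += 1
--     return "\n".join(lines[i:]).strip()
-- ===== SOURCE B (Python) =====
-- def _strip_reply_quote(body: str) -> str:
--     # Consume the leading quote block on the raw string, one line at a time;
--     # the final .strip() absorbs the blank separator line(s), so no line
--     # splitting or blank-skip loop is needed.
--     while body.startswith("> "):
--         nl = body.find("\n")
--         if nl == -1:
--             return ""
--         body = body[nl + 1:]
--     return body.strip()
-- ===== Notes on version B (the rewrite author's own statement) =====
-- stated objective: simpler
-- what changed: B consumes the leading '> ' quote block directly on the raw string (advance past each newline) and lets the final .strip() absorb the blank separator, instead of splitting into a line list, running two index loops (quote skip and blank skip) and re-joining.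
import Mathlib
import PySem

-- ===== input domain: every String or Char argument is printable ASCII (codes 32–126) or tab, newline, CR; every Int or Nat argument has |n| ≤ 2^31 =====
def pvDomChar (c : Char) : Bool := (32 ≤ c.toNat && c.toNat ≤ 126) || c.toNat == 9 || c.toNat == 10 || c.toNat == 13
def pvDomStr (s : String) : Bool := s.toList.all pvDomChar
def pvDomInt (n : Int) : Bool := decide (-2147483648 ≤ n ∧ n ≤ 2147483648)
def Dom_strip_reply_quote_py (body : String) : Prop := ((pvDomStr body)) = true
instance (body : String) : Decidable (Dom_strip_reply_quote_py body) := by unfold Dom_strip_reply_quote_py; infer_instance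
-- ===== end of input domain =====

-- B strips the leading '> ' quote block in one pass over the raw string (no line list,
-- no blank-skip loop); objective: simpler. Proven equal to A on all inputs.

-- ===== PORT A =====
-- while i < len(lines) and lines[i].startswith("> "): i += 1   (walking i forward = dropping handled lines)
def pvSkipQuote : List (List Char) → List (List Char)
  | [] => []
  | l :: ls => if PySem.Chars.startswith l ['>', ' '] then pvSkipQuote ls else l :: ls

-- while i < len(lines) and lines[i].strip() == "": i += 1
def pvSkipBlank : List (List Char) → List (List Char)
  | [] => []
  | l :: ls => if PySem.Chars.strip l = [] then pvSkipBlank ls else l :: ls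

def strip_reply_quote_py (body : String) : String :=
  let lines := PySem.Chars.splitOn body.toList ['\n']          -- body.split("\n")
  String.ofList (PySem.Chars.strip
    (PySem.Chars.join ['\n'] (pvSkipBlank (pvSkipQuote lines))))  -- "\n".join(lines[i:]).strip()

-- ===== PORT B =====
-- body.find("\n"); return "" if -1 else continue with body[nl+1:]  — exact: scanning to the
-- first '\n' and keeping the suffix after it is precisely find + slice [nl+1:].
def pvDropAfterNL : List Char → Option (List Char)
  | [] => none
  | '\n' :: r => some r
  | _ :: r => pvDropAfterNL r

theorem pvDropAfterNL_cons_ne (c : Char) (r : List Char) (hc : c ≠ '\n') :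
    pvDropAfterNL (c :: r) = pvDropAfterNL r := by
  rw [pvDropAfterNL.eq_def]
  split
  all_goals simp_all

theorem pvDropAfterNL_len : ∀ (cs r : List Char), pvDropAfterNL cs = some r → r.length < cs.length
  | [], _, hsome => by simp [pvDropAfterNL] at hsome
  | c :: rest, r, hsome => by
    by_cases hc : c = '\n'
    · subst hc
      have hr : rest = r := by simpa [pvDropAfterNL] using hsome
      subst hr; simp
    · rw [pvDropAfterNL_cons_ne c rest hc] at hsome
      exact Nat.lt_trans (pvDropAfterNL_len rest r hsome) (by simp)

-- while body.startswith("> "): …  ; return body.strip()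
def pvAltGo (cs : List Char) : List Char :=
  if PySem.Chars.startswith cs ['>', ' '] then
    match h : pvDropAfterNL cs with
    | none => []                                              -- return ""
    | some r => pvAltGo r                                     -- body = body[nl+1:]
  else PySem.Chars.strip cs                                   -- return body.strip()
termination_by cs.length
decreasing_by exact pvDropAfterNL_len cs r h

def strip_reply_quote_py_alt (body : String) : String :=
  String.ofList (pvAltGo body.toList)

-- ===== PRECONDITION & SPEC =====
def Spec_strip_reply_quote_py (body : String) (out : String) : Prop := out = strip_reply_quote_py_alt body
instance (body : String) (out : String) : Decidable (Spec_strip_reply_quote_py body out) := by unfold Spec_strip_reply_quote_py; infer_instance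

-- ===== CLAIM (what is proved, stated in full; the proofs are below) =====
def Claim_equal_strip_reply_quote_py : Prop := ∀ (body : String), Dom_strip_reply_quote_py body → Spec_strip_reply_quote_py body (strip_reply_quote_py body)

-- ===== LEMMAS AND PROOFS =====

-- Reference single-'\n' splitter, and its agreement with PySem.Chars.splitOn
def pvSplitNL : List Char → List (List Char)
  | [] => [[]]
  | c :: r => if c = '\n' then [] :: pvSplitNL r
              else match pvSplitNL r with
                   | p :: ps => (c :: p) :: ps
                   | [] => [[c]]

theorem pvSplitNL_ne_nil (cs : List Char) : pvSplitNL cs ≠ [] := by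
  cases cs with
  | nil => simp [pvSplitNL]
  | cons c r => simp only [pvSplitNL]; split <;> [simp; split <;> simp]

theorem pvSplitOn_go_spec : ∀ (fuel : Nat) (l cur : List Char) (acc : List (List Char)),
    l.length < fuel →
    PySem.Chars.splitOn.go ['\n'] fuel l cur acc =
      acc.reverse ++ (match pvSplitNL l with
                      | p :: ps => (cur.reverse ++ p) :: ps
                      | [] => [])
  | 0, l, cur, acc, h => by omega
  | fuel + 1, [], cur, acc, _ => by
    simp [PySem.Chars.splitOn.go, pvSplitNL]
  | fuel + 1, c :: rest, cur, acc, h => by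
    by_cases hc : c = '\n'
    · subst hc
      have hpre : List.isPrefixOf ['\n'] ('\n' :: rest) = true := by
        simp [List.isPrefixOf]
      rw [PySem.Chars.splitOn.go]
      simp only [hpre, if_pos]
      have := pvSplitOn_go_spec fuel rest [] (cur.reverse :: acc)
        (by simpa using Nat.lt_of_succ_lt_succ h)
      simp only [List.length_cons, List.length_nil, List.drop_succ_cons, List.drop_zero,
        Nat.zero_add] at this ⊢
      rw [this]
      rcases hs : pvSplitNL rest with _ | ⟨p, ps⟩
      · exact absurd hs (pvSplitNL_ne_nil rest)
      · simp [pvSplitNL, hs]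
    · have hpre : List.isPrefixOf ['\n'] (c :: rest) = false := by
        simp only [List.isPrefixOf, Bool.and_eq_false_iff, beq_eq_false_iff_ne, ne_eq]
        left; exact fun hh => hc (Eq.symm hh)
      rw [PySem.Chars.splitOn.go]
      simp only [hpre, Bool.false_eq_true, if_neg, not_false_iff]
      have := pvSplitOn_go_spec fuel rest (c :: cur) acc
        (Nat.lt_of_succ_lt_succ h)
      rw [this]
      rcases hs : pvSplitNL rest with _ | ⟨p, ps⟩
      · exact absurd hs (pvSplitNL_ne_nil rest)
      · simp [pvSplitNL, hc, hs]

theorem pvSplitOn_eq_splitNL (cs : List Char) :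
    PySem.Chars.splitOn cs ['\n'] = pvSplitNL cs := by
  unfold PySem.Chars.splitOn
  rw [pvSplitOn_go_spec (cs.length + 1) cs [] [] (by omega)]
  rcases hs : pvSplitNL cs with _ | ⟨p, ps⟩
  · exact absurd hs (pvSplitNL_ne_nil cs)
  · simp

-- join undoes the split, and every produced line is newline-free
theorem pvJoin_splitNL (cs : List Char) :
    PySem.Chars.join ['\n'] (pvSplitNL cs) = cs := by
  induction cs with
  | nil => simp [pvSplitNL, PySem.Chars.join_singleton]
  | cons c r ih =>
    by_cases hc : c = '\n'
    · subst hc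
      have hstep : pvSplitNL ('\n' :: r) = [] :: pvSplitNL r := by simp [pvSplitNL]
      rw [hstep]
      rcases hs : pvSplitNL r with _ | ⟨p, ps⟩
      · exact absurd hs (pvSplitNL_ne_nil r)
      · rw [hs] at ih
        rw [PySem.Chars.join_cons_cons, ih]
        simp
    · rcases hs : pvSplitNL r with _ | ⟨p, ps⟩
      · exact absurd hs (pvSplitNL_ne_nil r)
      · have hstep : pvSplitNL (c :: r) = (c :: p) :: ps := by
          simp [pvSplitNL, hc, hs]
        rw [hs] at ih
        rw [hstep]
        cases ps with
        | nil =>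
          rw [PySem.Chars.join_singleton] at ih ⊢
          simp [ih]
        | cons q qs =>
          rw [PySem.Chars.join_cons_cons] at ih ⊢
          simp [← ih]

theorem pvSplitNL_nf (cs : List Char) : ∀ l ∈ pvSplitNL cs, '\n' ∉ l := by
  induction cs with
  | nil => intro l hl; simp [pvSplitNL] at hl; simp [hl]
  | cons c r ih =>
    intro l hl
    by_cases hc : c = '\n'
    · subst hc
      rw [show pvSplitNL ('\n' :: r) = [] :: pvSplitNL r from by simp [pvSplitNL]] at hl
      rcases List.mem_cons.mp hl with h | h
      · simp [h]
      · exact ih l h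
    · rcases hs : pvSplitNL r with _ | ⟨p, ps⟩
      · exact absurd hs (pvSplitNL_ne_nil r)
      · rw [show pvSplitNL (c :: r) = (c :: p) :: ps from by simp [pvSplitNL, hc, hs]] at hl
        rcases List.mem_cons.mp hl with h | h
        · subst h
          intro hm
          rcases List.mem_cons.mp hm with h' | h'
          · exact hc h'.symm
          · exact ih p (by simp [hs]) h'
        · exact ih l (by simp [hs, h])

-- pvDropAfterNL facts
theorem pvDropAfterNL_of_nf (l : List Char) (h : '\n' ∉ l) : pvDropAfterNL l = none := by
  induction l with
  | nil => rfl
  | cons c r ih =>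
    have hc : c ≠ '\n' := fun hc => h (by simp [hc])
    rw [pvDropAfterNL_cons_ne c r hc]
    exact ih (fun hm => h (by simp [hm]))

theorem pvDropAfterNL_append (l t : List Char) (h : '\n' ∉ l) :
    pvDropAfterNL (l ++ '\n' :: t) = some t := by
  induction l with
  | nil => rfl
  | cons c r ih =>
    have hc : c ≠ '\n' := fun hc => h (by simp [hc])
    rw [List.cons_append, pvDropAfterNL_cons_ne c _ hc]
    exact ih (fun hm => h (by simp [hm]))

-- unfolding lemmas for pvAltGo's three exits
theorem pvAltGo_none (cs : List Char) (hq : PySem.Chars.startswith cs ['>', ' '] = true)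
    (hd : pvDropAfterNL cs = none) : pvAltGo cs = [] := by
  rw [pvAltGo]
  simp only [hq, if_pos]
  split
  · rfl
  · next r hr => rw [hd] at hr; cases hr

theorem pvAltGo_some (cs r : List Char) (hq : PySem.Chars.startswith cs ['>', ' '] = true)
    (hd : pvDropAfterNL cs = some r) : pvAltGo cs = pvAltGo r := by
  rw [pvAltGo]
  simp only [hq, if_pos]
  split
  · next hr => rw [hd] at hr; cases hr
  · next r' hr => rw [hd] at hr; cases hr; rfl

theorem pvAltGo_nostart (cs : List Char) (hq : PySem.Chars.startswith cs ['>', ' '] = false) :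
    pvAltGo cs = PySem.Chars.strip cs := by
  rw [pvAltGo]
  simp [hq]

-- startswith behaviour of a joined first line
theorem pvStartswith_join (l t : List Char) :
    PySem.Chars.startswith (l ++ '\n' :: t) ['>', ' '] =
      PySem.Chars.startswith l ['>', ' '] := by
  match l with
  | [] => simp [PySem.Chars.startswith, List.isPrefixOf]
  | [a] => simp [PySem.Chars.startswith, List.isPrefixOf]
  | a :: b :: r => simp [PySem.Chars.startswith, List.isPrefixOf]

-- a line whose strip is empty consists of whitespace only
theorem pvStrip_eq_nil_isspace (w : List Char) (h : PySem.Chars.strip w = []) :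
    ∀ c ∈ w, PySem.Chars.isspace c = true := by
  unfold PySem.Chars.strip PySem.Chars.rstrip PySem.Chars.lstrip at h
  rcases hd : List.dropWhile PySem.Chars.isspace w with _ | ⟨x, xs⟩
  · exact fun c hc => List.dropWhile_eq_nil_iff.mp hd c hc
  · exfalso
    have hne : List.dropWhile PySem.Chars.isspace w ≠ [] := by simp [hd]
    have hx1 : PySem.Chars.isspace ((List.dropWhile PySem.Chars.isspace w).head hne) = false :=
      List.head_dropWhile_not PySem.Chars.isspace hne
    have h2 : List.dropWhile PySem.Chars.isspace (List.dropWhile PySem.Chars.isspace w).reverse = [] := by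
      rwa [List.reverse_eq_nil_iff] at h
    have hall := List.dropWhile_eq_nil_iff.mp h2
    have : PySem.Chars.isspace ((List.dropWhile PySem.Chars.isspace w).head hne) = true :=
      hall _ (by simp [List.head_mem])
    rw [hx1] at this
    exact absurd this (by simp)

theorem pvLstrip_append_space (w t : List Char)
    (hall : ∀ c ∈ w, PySem.Chars.isspace c = true) :
    PySem.Chars.lstrip (w ++ t) = PySem.Chars.lstrip t := by
  induction w with
  | nil => rfl
  | cons c r ih =>
    unfold PySem.Chars.lstrip at ih ⊢
    rw [List.cons_append, List.dropWhile_cons, if_pos (hall c (by simp))]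
    exact ih (fun a ha => hall a (by simp [ha]))

-- strip absorbs a leading whitespace-only line plus its separator
theorem pvStrip_cons_space (w t : List Char) (h : PySem.Chars.strip w = []) :
    PySem.Chars.strip (w ++ '\n' :: t) = PySem.Chars.strip t := by
  have h1 : PySem.Chars.lstrip ((w ++ ['\n']) ++ t) = PySem.Chars.lstrip t := by
    refine pvLstrip_append_space (w ++ ['\n']) t ?_
    intro c hc
    rcases List.mem_append.mp hc with h' | h'
    · exact pvStrip_eq_nil_isspace w h c h'
    · simp at h'; subst h'; rfl
  unfold PySem.Chars.strip
  rw [show w ++ '\n' :: t = (w ++ ['\n']) ++ t by simp, h1]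

-- the blank-skip loop is redundant under the final strip
theorem pvSkipBlank_strip_join (ls : List (List Char)) :
    PySem.Chars.strip (PySem.Chars.join ['\n'] (pvSkipBlank ls)) =
      PySem.Chars.strip (PySem.Chars.join ['\n'] ls) := by
  induction ls with
  | nil => rfl
  | cons l ls ih =>
    by_cases hb : PySem.Chars.strip l = []
    · simp only [pvSkipBlank, if_pos hb]
      rw [ih]
      cases ls with
      | nil =>
        rw [PySem.Chars.join_singleton, PySem.Chars.join_nil, hb]
        rfl
      | cons q qs =>
        rw [PySem.Chars.join_cons_cons]
        rw [show l ++ ['\n'] ++ PySem.Chars.join ['\n'] (q :: qs)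
              = l ++ '\n' :: PySem.Chars.join ['\n'] (q :: qs) by simp]
        exact (pvStrip_cons_space l _ hb).symm
    · simp [pvSkipBlank, if_neg hb]

-- main correspondence: B's raw-string loop = strip of join of A's quote-skip loop
theorem pvAltGo_join (ls : List (List Char)) (hne : ls ≠ [])
    (hnf : ∀ l ∈ ls, '\n' ∉ l) :
    pvAltGo (PySem.Chars.join ['\n'] ls) =
      PySem.Chars.strip (PySem.Chars.join ['\n'] (pvSkipQuote ls)) := by
  induction ls with
  | nil => exact absurd rfl hne
  | cons l ls ih =>
    by_cases hq : PySem.Chars.startswith l ['>', ' '] = true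
    · cases ls with
      | nil =>
        rw [PySem.Chars.join_singleton,
          pvAltGo_none l hq (pvDropAfterNL_of_nf l (hnf l (by simp)))]
        simp [pvSkipQuote, hq, PySem.Chars.join_nil, PySem.Chars.strip,
          PySem.Chars.lstrip, PySem.Chars.rstrip]
      | cons q qs =>
        rw [PySem.Chars.join_cons_cons]
        rw [show l ++ ['\n'] ++ PySem.Chars.join ['\n'] (q :: qs)
              = l ++ '\n' :: PySem.Chars.join ['\n'] (q :: qs) by simp]
        rw [pvAltGo_some _ (PySem.Chars.join ['\n'] (q :: qs))
          (by rw [pvStartswith_join]; exact hq)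
          (pvDropAfterNL_append l _ (hnf l (by simp)))]
        rw [ih (by simp) (fun a ha => hnf a (by simp [ha]))]
        simp [pvSkipQuote, hq]
    · have hqf : PySem.Chars.startswith l ['>', ' '] = false := by
        simpa using hq
      have hsw : PySem.Chars.startswith (PySem.Chars.join ['\n'] (l :: ls)) ['>', ' '] = false := by
        cases ls with
        | nil => rw [PySem.Chars.join_singleton]; exact hqf
        | cons q qs =>
          rw [PySem.Chars.join_cons_cons,
            show l ++ ['\n'] ++ PySem.Chars.join ['\n'] (q :: qs)
              = l ++ '\n' :: PySem.Chars.join ['\n'] (q :: qs) by simp,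
            pvStartswith_join]
          exact hqf
      rw [pvAltGo_nostart _ hsw]
      simp [pvSkipQuote, hqf]

-- ===== VERDICT (by name: the statement is the Claim_ definition above) =====
theorem strip_reply_quote_py_spec : Claim_equal_strip_reply_quote_py := by
  intro body _
  unfold Spec_strip_reply_quote_py strip_reply_quote_py strip_reply_quote_py_alt
  simp only [pvSplitOn_eq_splitNL]
  rw [pvSkipBlank_strip_join,
    ← pvAltGo_join (pvSplitNL body.toList) (pvSplitNL_ne_nil _) (pvSplitNL_nf _),
    pvJoin_splitNL]
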